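-- pv_equiv track=rewrite | github.com/lucaslopes/hedonic-game | hedonic.py | get_all_states
-- ===== SOURCE A (Python) =====
-- def get_all_states(nodes): # receive list of nodes
-- 	states = []
-- 	for k in range(1, int(2 ** (len(nodes) - 1))):
-- 		num = list(bin(k))[2:]
-- 		num.reverse()
-- 		positions = []
-- 		for pos, value in enumerate(num):
-- 			if int(value) == 1:
-- 				positions.append(nodes[pos])
-- 		states.append(positions)
-- 	return states
-- ===== SOURCE B (Python) =====
-- def get_all_states(nodes):
--     if not nodes:
--         return []
--     subsets = [[]]
--     # build all subsets of nodes[:-1] in binary-counter order by a product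
--     # construction (the last node is never used: A's range stops at 2**(n-1))
--     for x in reversed(nodes[:-1]):
--         subsets = [t for s in subsets for t in (s, [x] + s)]
--     return subsets[1:]
-- ===== Notes on version B (the rewrite author's own statement) =====
-- stated objective: alternative
-- what changed: B builds the subset table by a product construction (doubling the list of subsets once per node, reusing already-built subsets) instead of decoding every counter value k via bin(k) string parsing.
import Mathlib
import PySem

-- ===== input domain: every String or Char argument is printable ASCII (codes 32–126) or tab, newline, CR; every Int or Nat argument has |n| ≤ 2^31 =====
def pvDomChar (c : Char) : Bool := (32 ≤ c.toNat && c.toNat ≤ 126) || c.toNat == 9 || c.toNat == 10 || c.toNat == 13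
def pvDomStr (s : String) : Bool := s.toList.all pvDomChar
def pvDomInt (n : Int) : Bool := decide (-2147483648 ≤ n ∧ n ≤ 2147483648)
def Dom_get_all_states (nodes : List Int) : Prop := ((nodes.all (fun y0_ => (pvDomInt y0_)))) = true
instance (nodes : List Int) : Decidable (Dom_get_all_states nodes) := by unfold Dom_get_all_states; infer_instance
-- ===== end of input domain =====

-- B replaces per-k bin(k) string decoding by a product construction that doubles
-- the subset list once per node, reusing already-built subsets (a different algorithm, same cost).

-- ===== PORT A =====
-- binary digits of k, least-significant first; exact rendering of list(bin(k))[2:] reversed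
-- (the port builds bin(k)'s character list '0'::'b'::digits-MSB-first from it, see below)
def pvBinRev (k : Nat) : List Char :=
  if h : k = 0 then []
  else (if k % 2 = 1 then '1' else '0') :: pvBinRev (k / 2)
decreasing_by exact Nat.div_lt_self (Nat.pos_of_ne_zero h) (by norm_num)

def get_all_states (nodes : List Int) : List (List Int) :=
  -- int(2 ** (len(nodes) - 1)): Python gives 0 for the empty list (int(0.5) == 0)
  let limit : Int := if nodes.length = 0 then 0 else 2 ^ (nodes.length - 1)
  (PySem.List.pyRange 1 limit 1).foldl (fun states k =>
    -- num = list(bin(k))[2:]; num.reverse()  (k ≥ 1 inside the loop, so k.toNat is exact)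
    let num := (('0' :: 'b' :: (pvBinRev k.toNat).reverse).drop 2).reverse
    -- for pos, value in enumerate(num): if int(value) == 1: positions.append(nodes[pos])
    -- value is '0' or '1'; nodes[pos] is always in range here, pyGetD is exact
    let positions := (PySem.List.enumerate num 0).foldl (fun positions pv =>
      if pv.2 = '1' then positions ++ [PySem.List.pyGetD nodes pv.1 0] else positions) []
    states ++ [positions]) []

-- ===== PORT B =====
def get_all_states_alt (nodes : List Int) : List (List Int) :=
  if nodes = [] then []
  else
    let subsets := ((PySem.List.slice nodes none (some (-1))).reverse).foldl
      (fun acc x => acc.flatMap (fun s => [s, x :: s])) [[]]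
    subsets.drop 1

-- ===== PRECONDITION & SPEC =====
def Spec_get_all_states (nodes : List Int) (out : List (List Int)) : Prop := out = get_all_states_alt nodes
instance (nodes : List Int) (out : List (List Int)) : Decidable (Spec_get_all_states nodes out) := by unfold Spec_get_all_states; infer_instance

-- ===== CLAIM (what is proved, stated in full; the proofs are below) =====
def Claim_equal_get_all_states : Prop := ∀ (nodes : List Int), Dom_get_all_states nodes → Spec_get_all_states nodes (get_all_states nodes)

-- ===== LEMMAS AND PROOFS =====

-- the common specification: the subset of ns selected by the binary digits of k
def pvDecode (ns : List Int) (k : Nat) : List Int :=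
  if h : k = 0 then []
  else (if k % 2 = 1 then [ns.headD 0] else []) ++ pvDecode ns.tail (k / 2)
decreasing_by exact Nat.div_lt_self (Nat.pos_of_ne_zero h) (by norm_num)

theorem pvDecode_zero (ns : List Int) : pvDecode ns 0 = [] := by
  unfold pvDecode; simp

theorem pvDecode_two_mul (ns : List Int) (j : Nat) :
    pvDecode ns (2 * j) = pvDecode ns.tail j := by
  rcases Nat.eq_zero_or_pos j with h | h
  · simp [h, pvDecode_zero]
  · have h2 : 2 * j ≠ 0 := by omega
    conv_lhs => rw [pvDecode]
    simp [h2, Nat.mul_mod_right, Nat.mul_div_cancel_left _ (by norm_num : 0 < 2)]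

theorem pvDecode_two_mul_add_one (ns : List Int) (j : Nat) :
    pvDecode ns (2 * j + 1) = ns.headD 0 :: pvDecode ns.tail j := by
  conv_lhs => rw [pvDecode]
  have h2 : 2 * j + 1 ≠ 0 := by omega
  have hm : (2 * j + 1) % 2 = 1 := by omega
  have hd : (2 * j + 1) / 2 = j := by omega
  simp [hm, hd]

-- A's inner loop over enumerate(num) computes pvDecode
theorem pvFold_enumerate (nodes : List Int) :
    ∀ (k p : Nat) (acc : List Int),
    (PySem.List.enumerate (pvBinRev k) (p : Int)).foldl (fun positions pv =>
      if pv.2 = '1' then positions ++ [PySem.List.pyGetD nodes pv.1 0] else positions) acc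
      = acc ++ pvDecode (nodes.drop p) k := by
  intro k
  induction k using Nat.strong_induction_on with
  | _ k ih =>
    intro p acc
    rcases Nat.eq_zero_or_pos k with hk | hk
    · subst hk
      simp [pvBinRev, PySem.List.enumerate_nil, pvDecode_zero]
    · have hk0 : k ≠ 0 := by omega
      rw [pvBinRev]
      simp only [hk0, dite_false]
      rw [PySem.List.enumerate_cons, List.foldl_cons]
      have hcast : (p : Int) + 1 = ((p + 1 : Nat) : Int) := by push_cast; ring
      rw [hcast, ih (k / 2) (Nat.div_lt_self hk (by norm_num)) (p + 1)]
      have hdrop : (nodes.drop p).tail = nodes.drop (p + 1) := by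
        rw [List.tail_drop]
      have hhead : PySem.List.pyGetD nodes (p : Int) 0 = (nodes.drop p).headD 0 := by
        rw [PySem.List.pyGetD_natCast]
        rw [List.headD_eq_head?_getD, List.head?_drop]
        rfl
      conv_rhs => rw [pvDecode]
      simp only [hk0, dite_false, hdrop]
      by_cases hodd : k % 2 = 1
      · simp [hodd, hhead, List.append_assoc]
      · simp [hodd]

-- A's body for counter value k equals pvDecode nodes k
theorem pvEntry_eq (nodes : List Int) (k : Nat) :
    ((PySem.List.enumerate ((('0' :: 'b' :: (pvBinRev k).reverse).drop 2).reverse) 0).foldl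
      (fun positions pv =>
        if pv.2 = '1' then positions ++ [PySem.List.pyGetD nodes pv.1 0] else positions) [])
      = pvDecode nodes k := by
  have h : (('0' :: 'b' :: (pvBinRev k).reverse).drop 2).reverse = pvBinRev k := by simp
  rw [h]
  have := pvFold_enumerate nodes k 0 []
  simpa using this

-- interleaving: a map over range (2*N) as a flatMap of consecutive pairs
theorem pvInterleave (f : Nat → List Int) :
    ∀ (N : Nat), (List.range (2 * N)).map f
      = (List.range N).flatMap (fun j => [f (2 * j), f (2 * j + 1)]) := by
  intro N
  induction N with
  | zero => simp
  | succ n ihn =>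
    have h2 : 2 * (n + 1) = (2 * n + 1) + 1 := by ring
    rw [h2, List.range_succ, List.range_succ, List.map_append, List.map_append,
        List.range_succ, List.flatMap_append, ihn]
    simp

-- the product construction builds exactly the pvDecode table
theorem pvProduct : ∀ (xs rest : List Int),
    (List.range (2 ^ xs.length)).map (pvDecode (xs ++ rest))
      = (xs.reverse).foldl (fun acc x => acc.flatMap (fun s => [s, x :: s])) [[]] := by
  intro xs
  induction xs with
  | nil =>
    intro rest
    simp [pvDecode_zero]
  | cons x xs' ih =>
    intro rest
    have hlen : 2 ^ (x :: xs').length = 2 * 2 ^ xs'.length := by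
      rw [List.length_cons, pow_succ]; ring
    rw [hlen, pvInterleave, List.reverse_cons, List.foldl_append, List.foldl_cons,
        List.foldl_nil, ← ih rest]
    rw [List.flatMap_map]
    apply List.flatMap_congr  -- congruence over the range
    intro j hj
    have hca : (x :: xs') ++ rest = x :: (xs' ++ rest) := by simp
    rw [hca, pvDecode_two_mul, pvDecode_two_mul_add_one]
    simp

-- ===== VERDICT (by name: the statement is the Claim_ definition above) =====
theorem get_all_states_spec : Claim_equal_get_all_states := by
  intro nodes _
  unfold Spec_get_all_states get_all_states get_all_states_alt
  rcases List.eq_nil_or_concat nodes with hnil | ⟨xs, x, hcat⟩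
  · subst hnil
    simp [PySem.List.pyRange_one_eq_nil]
  · subst hcat
    rw [List.concat_eq_append]
    have hne : xs ++ [x] ≠ [] := by simp
    have hlen0 : (xs ++ [x]).length ≠ 0 := by simp
    simp only [hne, if_false, hlen0]
    have hslice : PySem.List.slice (xs ++ [x]) none (some (-1)) = xs := by
      have h1 : (-1 : Int) = -((1 : Nat) : Int) := by norm_num
      rw [h1, PySem.List.slice_to_neg_natCast (xs ++ [x]) 1 (by norm_num)]
      simp
    rw [hslice]
    -- A's foldl is a map over the range
    rw [PySem.List.foldl_append_singleton_eq_map, List.nil_append]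
    have hlen : (xs ++ [x]).length - 1 = xs.length := by simp
    rw [hlen]
    -- rewrite the pyRange to a Nat range
    have hlim : ((2 : Int) ^ xs.length) = ((2 ^ xs.length : Nat) : Int) := by push_cast; ring
    rw [hlim, ← pvProduct xs [x]]
    -- now both sides are maps over Nat ranges; peel the leading 0 on the B side
    have hpos : 0 < 2 ^ xs.length := Nat.two_pow_pos _
    obtain ⟨N, hN⟩ : ∃ N, 2 ^ xs.length = N + 1 := ⟨2 ^ xs.length - 1, by omega⟩
    rw [hN, List.range_succ_eq_map, List.map_cons, List.drop_succ_cons, List.drop_zero,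
        List.map_map]
    rw [PySem.List.pyRange_one]
    have harg : ((((N + 1 : Nat) : Int)) - 1).toNat = N := by omega
    rw [harg, List.map_map]
    apply List.map_congr_left
    intro k hk
    have ht : ((1 : Int) + (k : Nat)).toNat = k + 1 := by omega
    simp only [Function.comp_apply, ht, pvEntry_eq]
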